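-- pv_equiv track=rewrite | github.com/carlaost/testing-repo | txtmsg_topics.py | create_features_dictionary
-- ===== SOURCE A (Python) =====
-- def create_features_dictionary(input):
--     features_dictionary = {}
--     index = 0
--     for token in input:
--         if token not in features_dictionary:
--             features_dictionary[token] = index
--             index +=1
--     return features_dictionary
-- ===== SOURCE B (Python) =====
-- def create_features_dictionary(input):
--     out = {}
--     rest = list(input)
--     while rest:
--         head = rest[0]
--         out[head] = len(out)
--         rest = [t for t in rest[1:] if t != head]
--     return out
-- ===== Notes on version B (the rewrite author's own statement) =====
-- stated objective: alternative
-- what changed: Replaces A's single pass with a membership test into the growing dict and a manual counter by a head-stripping scheme: repeatedly take the first remaining token, assign it len(out), and filter all its duplicates out of the remaining list, so no membership test or counter exists.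
import Mathlib
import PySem

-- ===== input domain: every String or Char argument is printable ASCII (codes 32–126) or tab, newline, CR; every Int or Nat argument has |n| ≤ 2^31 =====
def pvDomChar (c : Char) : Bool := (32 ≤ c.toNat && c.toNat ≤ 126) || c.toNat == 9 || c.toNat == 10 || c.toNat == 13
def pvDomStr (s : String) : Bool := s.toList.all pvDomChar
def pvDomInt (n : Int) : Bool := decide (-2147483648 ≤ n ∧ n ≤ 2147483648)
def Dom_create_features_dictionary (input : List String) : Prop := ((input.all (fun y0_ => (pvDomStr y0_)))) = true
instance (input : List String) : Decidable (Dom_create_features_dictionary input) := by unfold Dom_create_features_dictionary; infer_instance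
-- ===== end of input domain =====

-- B replaces A's single membership-testing pass with a counter by a head-stripping loop:
-- take the first remaining token, give it index len(out), filter its duplicates out of the rest (alternative decomposition).

-- ===== PORT A =====
-- the for-loop of A: state is (features_dictionary, index)
def cfdLoop : List String → PySem.Dict String Int → Int → PySem.Dict String Int
  | [], d, _ => d
  | t :: rest, d, i =>
      if ¬ d.contains t then cfdLoop rest (d.insert t i) (i + 1)
      else cfdLoop rest d i

def create_features_dictionary (input : List String) : List (String × Int) :=
  (cfdLoop input PySem.Dict.empty 0).items

-- ===== PORT B =====
-- B's while-loop: state is (rest, out); each step inserts the head with index len(out)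
-- and removes all its duplicates from the remaining list.
def cfdAltLoop : List String → PySem.Dict String Int → PySem.Dict String Int
  | [], out => out
  | h :: t, out =>
      cfdAltLoop (t.filter (fun x => x != h)) (out.insert h (Int.ofNat out.items.length))
termination_by rest _ => rest.length
decreasing_by
  simpa using Nat.lt_succ_of_le (List.length_filter_le _ _)

def create_features_dictionary_alt (input : List String) : List (String × Int) :=
  (cfdAltLoop input PySem.Dict.empty).items

-- ===== PRECONDITION & SPEC =====
def Spec_create_features_dictionary (input : List String) (out : List (String × Int)) : Prop := out = create_features_dictionary_alt input
instance (input : List String) (out : List (String × Int)) : Decidable (Spec_create_features_dictionary input out) := by unfold Spec_create_features_dictionary; infer_instance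

-- ===== CLAIM (what is proved, stated in full; the proofs are below) =====
def Claim_equal_create_features_dictionary : Prop := ∀ (input : List String), Dom_create_features_dictionary input → Spec_create_features_dictionary input (create_features_dictionary input)

-- ===== LEMMAS AND PROOFS =====

-- the keys A's loop newly inserts, given the keys already seen
def cfdNew (seen : List String) : List String → List String
  | [] => []
  | t :: rest => if seen.contains t then cfdNew seen rest else t :: cfdNew (seen ++ [t]) rest

-- the sequence of heads B's loop picks
def cfdHeads : List String → List String
  | [] => []
  | h :: t => h :: cfdHeads (t.filter (fun x => x != h))
termination_by xs => xs.length
decreasing_by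
  simpa using Nat.lt_succ_of_le (List.length_filter_le _ _)

theorem cfdLoop_items (rest : List String) :
    ∀ (d : PySem.Dict String Int) (i : Int),
      (cfdLoop rest d i).items
        = d.items ++ (PySem.List.enumerate (cfdNew d.keys rest) i).map (fun p => (p.2, p.1)) := by
  induction rest with
  | nil => intro d i; simp [cfdLoop, cfdNew]
  | cons t rest ih =>
    intro d i
    by_cases h : d.contains t = true
    · have hm : t ∈ d.keys := (PySem.Dict.contains_iff_mem_keys d t).1 h
      simp [cfdLoop, cfdNew, h, hm, ih]
    · simp only [Bool.not_eq_true] at h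
      have hm : t ∉ d.keys := fun hmem =>
        absurd ((PySem.Dict.contains_iff_mem_keys d t).2 hmem) (by simp [h])
      have hins := PySem.Dict.items_insert_of_not_contains d (k := t) i h
      have hkeys := PySem.Dict.keys_insert_of_not_contains d (k := t) i h
      rw [show cfdLoop (t :: rest) d i = cfdLoop rest (d.insert t i) (i + 1) by
            simp [cfdLoop, h]]
      rw [ih, hins, hkeys]
      simp [cfdNew, hm, PySem.List.enumerate_cons]

theorem mem_cfdHeads : ∀ (xs : List String) (a : String), a ∈ cfdHeads xs → a ∈ xs
  | [], a, h => by simp [cfdHeads] at h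
  | h :: t, a, ha => by
    rw [cfdHeads] at ha
    rcases List.mem_cons.1 ha with rfl | ha
    · exact List.mem_cons_self
    · have hlt : (t.filter (fun x => x != h)).length < (h :: t).length := by
        simpa using Nat.lt_succ_of_le (List.length_filter_le _ _)
      exact List.mem_cons_of_mem _ (List.mem_of_mem_filter (mem_cfdHeads _ a ha))
termination_by xs => xs.length
decreasing_by simpa using Nat.lt_succ_of_le (List.length_filter_le _ _)

theorem cfdAltLoop_items : ∀ (xs : List String) (out : PySem.Dict String Int),
    (∀ a ∈ cfdHeads xs, out.contains a = false) →
    (cfdAltLoop xs out).items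
      = out.items ++ (PySem.List.enumerate (cfdHeads xs) (Int.ofNat out.items.length)).map
          (fun p => (p.2, p.1)) := by
  intro xs
  have hlt : ∀ (h : String) (t : List String),
      (t.filter (fun x => x != h)).length < (h :: t).length := by
    intro h t; simpa using Nat.lt_succ_of_le (List.length_filter_le _ _)
  match xs with
  | [] => intro out _; simp [cfdAltLoop, cfdHeads]
  | h :: t =>
    have ih := cfdAltLoop_items (t.filter (fun x => x != h))
    intro out hfresh
    have hh : out.contains h = false := hfresh h (by rw [cfdHeads]; exact List.mem_cons_self)
    have hins := PySem.Dict.items_insert_of_not_contains out (k := h) (Int.ofNat out.items.length) hh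
    rw [cfdAltLoop, ih]
    · rw [hins, cfdHeads, PySem.List.enumerate_cons]
      simp
    · intro a ha
      have hat : a ∈ t.filter (fun x => x != h) := mem_cfdHeads _ a ha
      have hane : a ≠ h := by
        have := List.of_mem_filter hat
        simpa using this
      have : out.contains a = false :=
        hfresh a (by rw [cfdHeads]; exact List.mem_cons_of_mem _ ha)
      rw [PySem.Dict.contains_insert]
      simp [hane, this]
termination_by xs => xs.length
decreasing_by simpa using Nat.lt_succ_of_le (List.length_filter_le _ _)

theorem cfdHeads_filter_eq_cfdNew : ∀ (xs seen : List String),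
    cfdHeads (xs.filter (fun x => !seen.contains x)) = cfdNew seen xs := by
  intro xs
  induction xs with
  | nil => intro seen; simp [cfdHeads, cfdNew]
  | cons t rest ih =>
    intro seen
    by_cases hs : seen.contains t = true
    · simp only [List.filter_cons, hs, Bool.not_true, cfdNew, if_true]
      exact ih seen
    · simp only [Bool.not_eq_true] at hs
      rw [List.filter_cons]
      simp only [hs, Bool.not_false, if_true, cfdNew, Bool.false_eq_true, if_false]
      rw [cfdHeads, List.filter_filter]
      congr 1
      rw [show (rest.filter fun x => (x != t) && !seen.contains x)
            = rest.filter (fun x => !(seen ++ [t]).contains x) by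
          apply List.filter_congr
          intro x _
          by_cases hx : x = t
          · subst hx; simp
          · simp [hx]]
      exact ih (seen ++ [t])

-- ===== VERDICT (by name: the statement is the Claim_ definition above) =====
theorem create_features_dictionary_spec : Claim_equal_create_features_dictionary := by
  intro input _
  unfold Spec_create_features_dictionary create_features_dictionary create_features_dictionary_alt
  rw [cfdLoop_items, cfdAltLoop_items]
  · have hh : cfdHeads input = cfdNew [] input := by
      have := cfdHeads_filter_eq_cfdNew input []
      simpa using this
    simp [PySem.Dict.keys_empty, hh]
  · intro a _
    exact PySem.Dict.contains_empty a
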